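-- pv_equiv track=rewrite | github.com/Skyvern-AI/skyvern | skyvern/webeye/scraper/scraper.py | _trimmed_attributes
-- ===== SOURCE A (Python) =====
-- RESERVED_ATTRIBUTES = {
--     "accept",  # for input file
--     "alt",
--     "shape-description",  # for css shape
--     "aria-checked",  # for option tag
--     "aria-current",
--     "aria-label",
--     "aria-required",
--     "aria-role",
--     "aria-selected",  # for option tag
--     "checked",
--     "data-original-title",  # for bootstrap tooltip
--     "data-ui",
--     "disabled",  # for button
--     "aria-disabled",
--     "for",
--     "href",  # For a tags
--     "maxlength",
--     "name",
--     "pattern",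
--     "placeholder",
--     "readonly",
--     "required",
--     "selected",  # for option tag
--     "src",  # do we need this?
--     "text-value",
--     "title",
--     "type",
--     "value",
-- }
--
-- def _trimmed_attributes(attributes: dict) -> dict:
--     new_attributes: dict = {}
--
--     for key in attributes:
--         if key == "role" and attributes[key] in ["listbox", "option"]:
--             new_attributes[key] = attributes[key]
--         if key in RESERVED_ATTRIBUTES:
--             new_attributes[key] = attributes[key]
--
--     return new_attributes
-- ===== SOURCE B (Python) =====
-- RESERVED_ATTRIBUTES = {
--     "accept", "alt", "shape-description", "aria-checked", "aria-current",
--     "aria-label", "aria-required", "aria-role", "aria-selected", "checked",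
--     "data-original-title", "data-ui", "disabled", "aria-disabled", "for",
--     "href", "maxlength", "name", "pattern", "placeholder", "readonly",
--     "required", "selected", "src", "text-value", "title", "type", "value",
-- }
--
-- def _trimmed_attributes(attributes: dict) -> dict:
--     # Subtractive construction: copy the whole dict, compute the unwanted keys
--     # by set difference, and delete them; survivors keep their original order.
--     result = dict(attributes)
--     doomed = set(result).difference(RESERVED_ATTRIBUTES)
--     if result.get("role") in ("listbox", "option"):
--         doomed.discard("role")
--     for key in doomed:
--         del result[key]
--     return result
-- ===== Notes on version B (the rewrite author's own statement) =====
-- stated objective: alternative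
-- what changed: B builds the result subtractively: it copies the whole dict, computes the set of unwanted keys by a set difference against RESERVED_ATTRIBUTES (discarding 'role' from it when its value is 'listbox'/'option'), and deletes them, instead of A's additive loop that tests each key and inserts the kept pairs into a fresh dict.
import Mathlib
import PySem

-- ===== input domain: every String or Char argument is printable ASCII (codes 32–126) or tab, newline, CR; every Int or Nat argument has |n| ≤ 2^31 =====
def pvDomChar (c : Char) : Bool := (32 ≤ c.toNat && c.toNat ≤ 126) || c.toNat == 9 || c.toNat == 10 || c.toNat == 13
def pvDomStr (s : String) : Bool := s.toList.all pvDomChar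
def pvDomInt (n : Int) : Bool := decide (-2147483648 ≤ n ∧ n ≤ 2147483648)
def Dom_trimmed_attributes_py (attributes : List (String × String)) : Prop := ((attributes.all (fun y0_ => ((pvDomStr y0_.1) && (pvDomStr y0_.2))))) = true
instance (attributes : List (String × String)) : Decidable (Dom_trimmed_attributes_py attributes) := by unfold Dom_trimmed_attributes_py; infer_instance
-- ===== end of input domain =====

-- B builds the result subtractively: copy the whole dict, compute the unwanted keys by a
-- set difference against RESERVED_ATTRIBUTES (minus a kept "role"), and delete them —
-- instead of A's additive key-by-key filtering loop (objective: alternative).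

-- ===== PORT A =====
-- RESERVED_ATTRIBUTES: the Python set's distinct elements, in literal order (shared module constant).
def pvReserved : List String :=
  ["accept", "alt", "shape-description", "aria-checked", "aria-current",
   "aria-label", "aria-required", "aria-role", "aria-selected", "checked",
   "data-original-title", "data-ui", "disabled", "aria-disabled", "for",
   "href", "maxlength", "name", "pattern", "placeholder", "readonly",
   "required", "selected", "src", "text-value", "title", "type", "value"]

-- 'for key in attributes: …' over the dict's (key, value) pairs; under Pre_ (distinct keys,
-- as in any real Python dict) attributes[key] is exactly the pair's value kv.2.
def trimmed_attributes_py (attributes : List (String × String)) : List (String × String) :=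
  let new_attributes : PySem.Dict String String :=
    attributes.foldl
      (fun nd kv =>
        let nd := if kv.1 == "role" && (kv.2 == "listbox" || kv.2 == "option")
                  then nd.insert kv.1 kv.2 else nd
        if pvReserved.contains kv.1 then nd.insert kv.1 kv.2 else nd)
      PySem.Dict.empty
  new_attributes.items

-- ===== PORT B =====
-- result = dict(attributes); doomed = set(result).difference(RESERVED_ATTRIBUTES);
-- if result.get("role") in ("listbox","option"): doomed.discard("role");
-- for key in doomed: del result[key]   (deletion order cannot affect the result)
def trimmed_attributes_py_alt (attributes : List (String × String)) : List (String × String) :=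
  let result := PySem.Dict.ofList attributes
  let doomed : PySem.Set String :=
    PySem.Set.diff (PySem.Set.ofList result.keys) pvReserved
  let doomed : PySem.Set String :=
    if result.get? "role" == some "listbox" || result.get? "role" == some "option"
    then PySem.Set.discard doomed "role" else doomed
  (doomed.foldl (fun d k => d.erase k) result).items

-- ===== PRECONDITION & SPEC =====
-- Pre_: the argument models a Python dict, whose keys are distinct; a list with duplicate
-- keys corresponds to no dict input of A, so nothing is claimed there.
def Pre_trimmed_attributes_py (attributes : List (String × String)) : Prop :=
  (attributes.map Prod.fst).Nodup
instance (attributes : List (String × String)) : Decidable (Pre_trimmed_attributes_py attributes) := by unfold Pre_trimmed_attributes_py; infer_instance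

def pvWitness_trimmed_attributes_py : (List (String × String)) :=
  [("alt", "photo"), ("role", "listbox"), ("x", "y")]

def Spec_trimmed_attributes_py (attributes : List (String × String)) (out : List (String × String)) : Prop := out = trimmed_attributes_py_alt attributes
instance (attributes : List (String × String)) (out : List (String × String)) : Decidable (Spec_trimmed_attributes_py attributes out) := by unfold Spec_trimmed_attributes_py; infer_instance

-- ===== CLAIM (what is proved, stated in full; the proofs are below) =====
def Claim_equal_trimmed_attributes_py : Prop := ∀ (attributes : List (String × String)), Dom_trimmed_attributes_py attributes → Pre_trimmed_attributes_py attributes → Spec_trimmed_attributes_py attributes (trimmed_attributes_py attributes)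

-- ===== LEMMAS AND PROOFS =====

-- The predicate characterising which pairs both programs keep.
def pvKeep (kv : String × String) : Bool :=
  pvReserved.contains kv.1 || (kv.1 == "role" && (kv.2 == "listbox" || kv.2 == "option"))

-- One step of A's loop inserts kv iff pvKeep kv (the two conditions are exclusive: "role" ∉ RESERVED).
lemma step_eq (nd : PySem.Dict String String) (kv : String × String) :
    (if pvReserved.contains kv.1 then
       (if kv.1 == "role" && (kv.2 == "listbox" || kv.2 == "option")
        then nd.insert kv.1 kv.2 else nd).insert kv.1 kv.2
     else
       (if kv.1 == "role" && (kv.2 == "listbox" || kv.2 == "option")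
        then nd.insert kv.1 kv.2 else nd))
    = if pvKeep kv then nd.insert kv.1 kv.2 else nd := by
  cases hrole : (kv.1 == "role" && (kv.2 == "listbox" || kv.2 == "option")) with
  | false => simp [pvKeep, hrole]
  | true =>
    have hk1 : kv.1 = "role" := by
      simp only [Bool.and_eq_true, beq_iff_eq] at hrole
      exact hrole.1
    have hc : kv.1 ∉ pvReserved := by rw [hk1]; decide
    simp [pvKeep, hrole, hc]

-- Loop invariant for A: folding A's step over a list of fresh, distinct keys appends the kept pairs.
lemma foldl_items (l : List (String × String)) (d : PySem.Dict String String)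
    (hnd : (l.map Prod.fst).Nodup)
    (hfresh : ∀ kv ∈ l, d.contains kv.1 = false) :
    (l.foldl
      (fun nd kv =>
        let nd := if kv.1 == "role" && (kv.2 == "listbox" || kv.2 == "option")
                  then nd.insert kv.1 kv.2 else nd
        if pvReserved.contains kv.1 then nd.insert kv.1 kv.2 else nd)
      d).items = d.items ++ l.filter pvKeep := by
  induction l generalizing d with
  | nil => simp
  | cons kv l ih =>
    simp only [List.foldl_cons]
    have hstep := step_eq d kv
    simp only [List.map_cons, List.nodup_cons] at hnd
    have hdkv : d.contains kv.1 = false := hfresh kv (by simp)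
    by_cases hk : pvKeep kv = true
    · rw [show (let nd := if kv.1 == "role" && (kv.2 == "listbox" || kv.2 == "option")
                  then d.insert kv.1 kv.2 else d;
               if pvReserved.contains kv.1 then nd.insert kv.1 kv.2 else nd)
            = d.insert kv.1 kv.2 by simpa [hk] using hstep]
      rw [ih (d.insert kv.1 kv.2) hnd.2 ?_]
      · rw [PySem.Dict.items_insert_of_not_contains _ _ hdkv]
        simp [hk]
      · intro p hp
        rw [PySem.Dict.contains_insert]
        have hne : (p.1 == kv.1) = false := by
          simp only [beq_eq_false_iff_ne, ne_eq]
          intro h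
          exact hnd.1 (h ▸ List.mem_map_of_mem hp)
        simp [hne, hfresh p (by simp [hp])]
    · rw [show (let nd := if kv.1 == "role" && (kv.2 == "listbox" || kv.2 == "option")
                  then d.insert kv.1 kv.2 else d;
               if pvReserved.contains kv.1 then nd.insert kv.1 kv.2 else nd)
            = d by simpa [hk] using hstep]
      rw [ih d hnd.2 (fun p hp => hfresh p (by simp [hp]))]
      simp [hk]

-- dict(attributes) on distinct keys has exactly 'attributes' as its items.
lemma items_ofList (l : List (String × String)) (h : (l.map Prod.fst).Nodup) :
    (PySem.Dict.ofList l).items = l := by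
  have := PySem.Dict.items_foldl_insert_fresh (l := l) (k := Prod.fst) (v := Prod.snd)
    (d := PySem.Dict.empty) (by intro a _; exact PySem.Dict.contains_empty a.1) h
  simpa [PySem.Dict.ofList] using this

-- 'del d[k]' on the items level.
lemma items_erase (d : PySem.Dict String String) (k : String) :
    (d.erase k).items = d.items.filter (fun p => !(p.1 == k)) := by
  cases d; simp [PySem.Dict.erase]

-- Deleting every key of ks filters the items by non-membership in ks (any order of ks).
lemma items_foldl_erase (ks : List String) (d : PySem.Dict String String) :
    (ks.foldl (fun d k => d.erase k) d).items
      = d.items.filter (fun p => !(ks.contains p.1)) := by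
  induction ks generalizing d with
  | nil => simp
  | cons k ks ih =>
    simp only [List.foldl_cons, ih, items_erase, List.filter_filter]
    apply List.filter_congr
    intro p _
    rw [List.contains_cons]
    cases hpk : (p.1 == k) <;> simp

-- ===== VERDICT (by name: the statement is the Claim_ definition above) =====
theorem trimmed_attributes_py_spec : Claim_equal_trimmed_attributes_py := by
  intro attributes _ hpre
  unfold Spec_trimmed_attributes_py
  unfold trimmed_attributes_py
  rw [foldl_items attributes PySem.Dict.empty hpre
      (fun kv _ => PySem.Dict.contains_empty kv.1)]
  unfold trimmed_attributes_py_alt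
  rw [items_foldl_erase]
  have hitems : (PySem.Dict.ofList attributes).items = attributes := items_ofList attributes hpre
  have hkeys : (PySem.Dict.ofList attributes).keys = attributes.map Prod.fst := by
    simp [PySem.Dict.keys, hitems]
  rw [hitems]
  show attributes.filter pvKeep = attributes.filter _
  apply List.filter_congr
  intro p hp
  have hmemkeys : p.1 ∈ (PySem.Dict.ofList attributes).keys := by
    rw [hkeys]; exact List.mem_map_of_mem hp
  have hkeysnd : (PySem.Dict.ofList attributes).keys.Nodup := by rw [hkeys]; exact hpre
  rw [Bool.eq_iff_iff]
  rw [show ∀ (s : List String), ((!s.contains p.1) = true ↔ p.1 ∉ s) from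
      fun s => by simp]
  by_cases hr : p.1 = "role"
  · -- the "role" key: kept iff its value is "listbox" or "option"
    have hg : (PySem.Dict.ofList attributes).get? "role" = some p.2 := by
      have hm : ("role", p.2) ∈ (PySem.Dict.ofList attributes).items := by
        rw [hitems]; exact hr ▸ hp
      exact PySem.Dict.get?_of_mem_items _ hm hkeysnd
    have hres : p.1 ∉ pvReserved := by rw [hr]; decide
    have hkeep : pvKeep p = true ↔ (p.2 == "listbox" || p.2 == "option") = true := by
      simp only [pvKeep, hr]
      simp
      exact fun h => absurd h (by decide)
    by_cases hcond : ((PySem.Dict.ofList attributes).get? "role" == some "listbox"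
        || (PySem.Dict.ofList attributes).get? "role" == some "option") = true
    · rw [if_pos hcond]
      have hv : (p.2 == "listbox" || p.2 == "option") = true := by
        rw [hg] at hcond; simpa using hcond
      constructor
      · intro _ hmem
        exact ((PySem.Set.mem_discard _ _ _).mp hmem).2 (hr ▸ rfl)
      · intro _; exact hkeep.mpr hv
    · rw [if_neg hcond]
      have hv : (p.2 == "listbox" || p.2 == "option") = false := by
        rw [hg] at hcond
        simpa using hcond
      constructor
      · intro hk; exact absurd (hkeep.mp hk) (by simp [hv])
      · intro hnmem
        exact absurd ((PySem.Set.mem_diff _ _ _).mpr ⟨(PySem.Set.mem_ofList _ _).mpr (hr ▸ hmemkeys), hr ▸ hres⟩) hnmem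
  · -- any other key: kept iff reserved; the discard of "role" cannot affect it
    have hkeep : pvKeep p = true ↔ p.1 ∈ pvReserved := by
      simp [pvKeep, hr]
    have hdiff : p.1 ∈ PySem.Set.diff (PySem.Set.ofList (PySem.Dict.ofList attributes).keys) pvReserved
        ↔ p.1 ∉ pvReserved := by
      rw [PySem.Set.mem_diff, PySem.Set.mem_ofList]
      exact ⟨fun h => h.2, fun h => ⟨hmemkeys, h⟩⟩
    have hif : p.1 ∈ (if ((PySem.Dict.ofList attributes).get? "role" == some "listbox"
          || (PySem.Dict.ofList attributes).get? "role" == some "option") = true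
        then PySem.Set.discard (PySem.Set.diff (PySem.Set.ofList (PySem.Dict.ofList attributes).keys) pvReserved) "role"
        else PySem.Set.diff (PySem.Set.ofList (PySem.Dict.ofList attributes).keys) pvReserved)
        ↔ p.1 ∉ pvReserved := by
      split
      · rw [PySem.Set.mem_discard, hdiff]
        exact ⟨fun h => h.1, fun h => ⟨h, hr⟩⟩
      · exact hdiff
    rw [hkeep, hif]
    exact not_not.symm
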